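-- pv_equiv track=rewrite | github.com/Clamepending/remote-vibes | experiments/arc-swarm/runs/hybrid/solver.py | _tile_2x2_to_4x4
-- ===== SOURCE A (Python) =====
-- Grid = list[list[int]]
--
-- def _tile_2x2_to_4x4(g: Grid) -> Grid:
--     h = len(g)
--     w = len(g[0])
--     out = [[0] * (w * 2) for _ in range(h * 2)]
--     for r in range(h * 2):
--         for c in range(w * 2):
--             out[r][c] = g[r % h][c % w]
--     return out
-- ===== SOURCE B (Python) =====
-- def _tile_2x2_to_4x4(g):
--     w = len(g[0])
--     doubled = [row[:w] * 2 for row in g]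
--     return doubled + [row[:] for row in doubled]
-- ===== Notes on version B (the rewrite author's own statement) =====
-- stated objective: faster
-- what changed: Replaces the preallocated zero matrix filled by per-cell modulo indexing with row-level concatenation (each row becomes row[:w]*2) followed by vertical duplication of the doubled block.
import Mathlib
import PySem

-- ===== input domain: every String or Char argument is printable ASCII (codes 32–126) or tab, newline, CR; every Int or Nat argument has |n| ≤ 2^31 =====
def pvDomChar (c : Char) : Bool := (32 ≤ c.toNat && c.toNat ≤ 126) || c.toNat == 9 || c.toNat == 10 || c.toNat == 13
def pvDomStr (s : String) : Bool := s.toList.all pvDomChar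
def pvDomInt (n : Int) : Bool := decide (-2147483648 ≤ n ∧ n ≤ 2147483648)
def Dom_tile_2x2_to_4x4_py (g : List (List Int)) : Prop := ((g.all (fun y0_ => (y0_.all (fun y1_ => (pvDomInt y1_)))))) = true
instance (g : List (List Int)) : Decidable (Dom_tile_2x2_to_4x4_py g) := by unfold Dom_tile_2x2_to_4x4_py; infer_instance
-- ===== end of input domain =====

-- B replaces A's per-cell modulo indexing into a preallocated matrix by row-level
-- concatenation (row[:w]*2) and vertical duplication of the doubled block (idiomatic).


-- ===== PORT A =====
-- h = len(g); w = len(g[0]); out is preallocated and each cell assigned exactly once,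
-- so out is ported as the nested map of the assigned value g[r % h][c % w].
def tile_2x2_to_4x4_py (g : List (List Int)) : List (List Int) :=
  let h : Int := g.length
  let w : Int := (((PySem.List.pyGet? g 0).getD []).length : Int)
  (PySem.List.pyRange 0 (h * 2) 1).map (fun r =>
    (PySem.List.pyRange 0 (w * 2) 1).map (fun c =>
      PySem.List.pyGetD (PySem.List.pyGetD g (PySem.Int.mod r h) [])
        (PySem.Int.mod c w) 0))

-- ===== PORT B =====
-- w = len(g[0]); doubled = [row[:w] * 2 for row in g]; return doubled + [row[:] for row in doubled]
-- (row[:] is a value-identity copy, ported as the identity map).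
def tile_2x2_to_4x4_py_alt (g : List (List Int)) : List (List Int) :=
  let w : Int := (((PySem.List.pyGet? g 0).getD []).length : Int)
  let doubled := g.map (fun row =>
    PySem.List.slice row none (some w) ++ PySem.List.slice row none (some w))
  doubled ++ doubled.map (fun row => row)

-- ===== PRECONDITION & SPEC =====
-- Pre_ excludes exactly the inputs where A raises IndexError: the empty grid (len(g[0]))
-- and grids with some row shorter than the first row (g[r][c % w] out of range).
def Pre_tile_2x2_to_4x4_py (g : List (List Int)) : Prop :=
  g ≠ [] ∧ ∀ row ∈ g, (g.headD []).length ≤ row.length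
instance (g : List (List Int)) : Decidable (Pre_tile_2x2_to_4x4_py g) := by
  unfold Pre_tile_2x2_to_4x4_py; infer_instance
def pvWitness_tile_2x2_to_4x4_py : List (List Int) := [[1, 2], [3, 4]]

def Spec_tile_2x2_to_4x4_py (g : List (List Int)) (out : List (List Int)) : Prop := out = tile_2x2_to_4x4_py_alt g
instance (g : List (List Int)) (out : List (List Int)) : Decidable (Spec_tile_2x2_to_4x4_py g out) := by unfold Spec_tile_2x2_to_4x4_py; infer_instance

-- ===== CLAIM (what is proved, stated in full; the proofs are below) =====
def Claim_equal_tile_2x2_to_4x4_py : Prop := ∀ (g : List (List Int)), Dom_tile_2x2_to_4x4_py g → Pre_tile_2x2_to_4x4_py g → Spec_tile_2x2_to_4x4_py g (tile_2x2_to_4x4_py g)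

-- ===== LEMMAS AND PROOFS =====

-- Inner row: A's modulo-indexed sweep over range(0, 2*w) equals B's doubled w-prefix.
lemma pv_inner_eq (row : List Int) (wn : Nat) (hw : wn ≤ row.length) :
    (PySem.List.pyRange 0 ((wn : Int) * 2) 1).map
        (fun c => PySem.List.pyGetD row (PySem.Int.mod c (wn : Int)) 0)
      = row.take wn ++ row.take wn := by
  rcases Nat.eq_zero_or_pos wn with h0 | hpos
  · subst h0; simp [PySem.List.pyRange_one_eq_nil]
  · apply List.ext_getElem
    · simp [PySem.List.length_pyRange_one]; omega
    · intro i hi1 hi2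
      have hi : i < 2 * wn := by
        simp [PySem.List.length_pyRange_one] at hi1; omega
      have hmlt : i % wn < row.length := Nat.lt_of_lt_of_le (Nat.mod_lt _ hpos) hw
      have htl : (row.take wn).length = wn := by simp; omega
      simp only [List.getElem_map]
      rw [PySem.List.getElem_pyRange_one]
      have hcast : (0 : Int) + (i : Int) = ((i : Nat) : Int) := by ring
      rw [hcast, PySem.Int.mod_natCast, PySem.List.pyGetD_natCast,
        List.getD_eq_getElem _ _ hmlt]
      rcases Nat.lt_or_ge i wn with hlt | hge
      · rw [List.getElem_append_left (by rw [htl]; exact hlt)]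
        simp [List.getElem_take, Nat.mod_eq_of_lt hlt]
      · have hmod : i % wn = i - wn := by
          rw [Nat.mod_eq_sub_mod hge]; exact Nat.mod_eq_of_lt (by omega)
        rw [List.getElem_append_right (by rw [htl]; exact hge)]
        simp [List.getElem_take, htl, hmod]

-- Outer rows: A's modulo-indexed sweep over range(0, 2*h) equals the row block doubled.
lemma pv_outer {α β : Type} (xs : List α) (d : α) (hne : xs ≠ []) (F : α → β) :
    (PySem.List.pyRange 0 ((xs.length : Int) * 2) 1).map
        (fun r => F (PySem.List.pyGetD xs (PySem.Int.mod r (xs.length : Int)) d))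
      = xs.map F ++ xs.map F := by
  have hpos : 0 < xs.length := List.length_pos_iff.mpr hne
  apply List.ext_getElem
  · simp [PySem.List.length_pyRange_one]; omega
  · intro i hi1 hi2
    have hi : i < 2 * xs.length := by
      simp [PySem.List.length_pyRange_one] at hi1; omega
    have hmlt : i % xs.length < xs.length := Nat.mod_lt _ hpos
    simp only [List.getElem_map]
    rw [PySem.List.getElem_pyRange_one]
    have hcast : (0 : Int) + (i : Int) = ((i : Nat) : Int) := by ring
    rw [hcast, PySem.Int.mod_natCast, PySem.List.pyGetD_natCast,
      List.getD_eq_getElem _ _ hmlt]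
    have htl : (xs.map F).length = xs.length := by simp
    rcases Nat.lt_or_ge i xs.length with hlt | hge
    · rw [List.getElem_append_left (by rw [htl]; exact hlt)]
      simp [Nat.mod_eq_of_lt hlt]
    · have hmod : i % xs.length = i - xs.length := by
        rw [Nat.mod_eq_sub_mod hge]; exact Nat.mod_eq_of_lt (by omega)
      rw [List.getElem_append_right (by rw [htl]; exact hge)]
      simp [htl, hmod]

-- ===== VERDICT (by name: the statement is the Claim_ definition above) =====
theorem tile_2x2_to_4x4_py_spec : Claim_equal_tile_2x2_to_4x4_py := by
  intro g _ hpre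
  obtain ⟨hne, hrows⟩ := hpre
  obtain ⟨row0, rest, rfl⟩ := List.exists_cons_of_ne_nil hne
  have hget : PySem.List.pyGet? (row0 :: rest) (0 : Int) = some row0 := by
    simp [PySem.List.pyGet?, PySem.List.pyIdx?]
  unfold Spec_tile_2x2_to_4x4_py tile_2x2_to_4x4_py tile_2x2_to_4x4_py_alt
  simp only [hget, Option.getD_some, List.map_id']
  rw [pv_outer (row0 :: rest) [] hne
      (fun row => (PySem.List.pyRange 0 ((row0.length : Int) * 2) 1).map
        (fun c => PySem.List.pyGetD row (PySem.Int.mod c (row0.length : Int)) 0))]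
  congr 1 <;>
  · apply List.map_congr_left
    intro row hrow
    have hw : row0.length ≤ row.length := by
      have := hrows row hrow; simpa using this
    rw [pv_inner_eq row row0.length hw, PySem.List.slice_to_natCast]
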